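-- pv_equiv track=rewrite | github.com/EvolvingAgentsLabs/evolving-memory | scripts/prepare_sft_dataset.py | deduplicate_consecutive
-- ===== SOURCE A (Python) =====
-- def deduplicate_consecutive(examples: list[dict], keep_every: int = 3) -> list[dict]:
--     """Remove consecutive examples with identical assistant content, keeping every Nth."""
--     if not examples:
--         return examples
--
--     result = []
--     streak = 0
--     for i, ex in enumerate(examples):
--         assistant_content = ex["messages"][2]["content"]
--         if i > 0 and assistant_content == examples[i - 1]["messages"][2]["content"]:
--             streak += 1
--             if streak % keep_every == 0:
--                 result.append(ex)
--         else:
--             streak = 0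
--             result.append(ex)
--
--     return result
-- ===== SOURCE B (Python) =====
-- def deduplicate_consecutive(examples: list[dict], keep_every: int = 3) -> list[dict]:
--     """Remove consecutive examples with identical assistant content, keeping every Nth.
--
--     Group-then-filter: build the maximal runs of consecutive identical assistant
--     content in one pass, then keep index 0 and every keep_every-th element of
--     each run.
--     """
--     if not examples:
--         return examples
--
--     runs = []
--     current = [examples[0]]
--     cur_key = examples[0]["messages"][2]["content"]
--     for ex in examples[1:]:
--         key = ex["messages"][2]["content"]
--         if key == cur_key:
--             current.append(ex)
--         else:
--             runs.append(current)
--             current = [ex]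
--             cur_key = key
--     runs.append(current)
--
--     result = []
--     for run in runs:
--         for j, ex in enumerate(run):
--             if j == 0 or j % keep_every == 0:
--                 result.append(ex)
--     return result
-- ===== Notes on version B (the rewrite author's own statement) =====
-- stated objective: alternative
-- what changed: Replaces A's streak counter with modulo test against the previous element (examples[i-1] back-reference) by a group-then-filter decomposition: one pass builds the maximal runs of consecutive identical assistant content, then each run keeps its first element and every keep_every-th one.
import Mathlib
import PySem

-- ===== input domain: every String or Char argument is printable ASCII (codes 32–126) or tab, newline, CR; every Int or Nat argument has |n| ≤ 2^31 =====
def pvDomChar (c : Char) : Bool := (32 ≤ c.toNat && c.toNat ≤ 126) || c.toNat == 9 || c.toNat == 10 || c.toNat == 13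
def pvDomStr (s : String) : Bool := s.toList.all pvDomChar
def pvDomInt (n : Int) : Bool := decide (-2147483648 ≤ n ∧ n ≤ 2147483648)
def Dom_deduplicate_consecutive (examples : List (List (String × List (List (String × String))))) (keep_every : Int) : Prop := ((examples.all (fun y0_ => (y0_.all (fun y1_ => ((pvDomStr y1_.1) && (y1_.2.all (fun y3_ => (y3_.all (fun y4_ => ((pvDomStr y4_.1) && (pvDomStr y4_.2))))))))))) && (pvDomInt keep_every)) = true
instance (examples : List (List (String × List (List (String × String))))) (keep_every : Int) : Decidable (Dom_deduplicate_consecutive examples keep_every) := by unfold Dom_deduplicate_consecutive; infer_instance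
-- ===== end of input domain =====

-- B replaces A's streak counter and examples[i-1] back-reference by a group-then-filter
-- decomposition (build maximal runs, keep index 0 and every keep_every-th of each run); objective: alternative/idiomatic.

abbrev PvEx := List (String × List (List (String × String)))

-- shared accessor: ex["messages"][2]["content"]  (exact wherever the Python access succeeds; Pre_ guarantees that)
def pvContent (ex : PvEx) : String :=
  let messages := ((PySem.Dict.mk ex).get? "messages").getD []
  let msg := (PySem.List.pyGet? messages 2).getD []
  ((PySem.Dict.mk msg).get? "content").getD ""

-- ===== PORT A =====
def dedupStepA (examples : List PvEx) (keep_every : Int) (st : List PvEx × Int) (p : Int × PvEx) : List PvEx × Int :=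
  let result := st.1
  let streak := st.2
  let i := p.1
  let ex := p.2
  let assistant_content := pvContent ex
  if i > 0 ∧ assistant_content = pvContent ((PySem.List.pyGet? examples (i - 1)).getD []) then
    let streak := streak + 1
    if PySem.Int.mod streak keep_every = 0 then (result ++ [ex], streak) else (result, streak)
  else
    (result ++ [ex], 0)

def deduplicate_consecutive (examples : List (List (String × List (List (String × String))))) (keep_every : Int) : List (List (String × List (List (String × String)))) :=
  if examples = [] then examples
  else ((PySem.List.enumerate examples).foldl (dedupStepA examples keep_every) ([], 0)).1

-- ===== PORT B =====
-- one grouping pass: state (runs, current, cur_key)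
def pvGroupStep (st : List (List PvEx) × List PvEx × String) (ex : PvEx) : List (List PvEx) × List PvEx × String :=
  let key := pvContent ex
  if key = st.2.2 then (st.1, st.2.1 ++ [ex], st.2.2)
  else (st.1 ++ [st.2.1], [ex], key)

-- keep j == 0 or j % keep_every == 0 within a run
def pvKeep (keep_every : Int) (run : List PvEx) : List PvEx :=
  run.zipIdx.filterMap (fun p => if p.2 = 0 ∨ PySem.Int.mod (p.2 : Int) keep_every = 0 then some p.1 else none)

def deduplicate_consecutive_alt (examples : List (List (String × List (List (String × String))))) (keep_every : Int) : List (List (String × List (List (String × String)))) :=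
  match examples with
  | [] => examples
  | x :: rest =>
    let st := rest.foldl pvGroupStep ([], [x], pvContent x)
    let runs := st.1 ++ [st.2.1]
    runs.flatMap (pvKeep keep_every)

-- ===== PRECONDITION & SPEC =====
-- does ex["messages"][2]["content"] succeed?
def pvWF (ex : PvEx) : Bool :=
  ((((PySem.Dict.mk ex).get? "messages").bind (fun ms => PySem.List.pyGet? ms 2)).bind
    (fun m => (PySem.Dict.mk m).get? "content")).isSome

-- Pre_ excludes exactly the inputs where the Python A raises: a malformed example
-- (KeyError/IndexError on ex["messages"][2]["content"]) or keep_every = 0 together with a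
-- consecutive duplicate (ZeroDivisionError); B raises on exactly the same inputs.
def Pre_deduplicate_consecutive (examples : List (List (String × List (List (String × String))))) (keep_every : Int) : Prop :=
  (∀ ex ∈ examples, pvWF ex = true) ∧
  (keep_every = 0 → examples.IsChain (fun a b => pvContent a ≠ pvContent b))
instance (examples : List (List (String × List (List (String × String))))) (keep_every : Int) : Decidable (Pre_deduplicate_consecutive examples keep_every) := by unfold Pre_deduplicate_consecutive; infer_instance

def pvWitness_deduplicate_consecutive : (List (List (String × List (List (String × String))))) × Int :=
  ([[("messages", [[], [], [("content", "a")]])],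
    [("messages", [[], [], [("content", "a")]])],
    [("messages", [[], [], [("content", "b")]])]], 3)

def Spec_deduplicate_consecutive (examples : List (List (String × List (List (String × String))))) (keep_every : Int) (out : List (List (String × List (List (String × String))))) : Prop := out = deduplicate_consecutive_alt examples keep_every
instance (examples : List (List (String × List (List (String × String))))) (keep_every : Int) (out : List (List (String × List (List (String × String))))) : Decidable (Spec_deduplicate_consecutive examples keep_every out) := by unfold Spec_deduplicate_consecutive; infer_instance

-- ===== CLAIM (what is proved, stated in full; the proofs are below) =====
def Claim_equal_deduplicate_consecutive : Prop := ∀ (examples : List (List (String × List (List (String × String))))) (keep_every : Int), Dom_deduplicate_consecutive examples keep_every → Pre_deduplicate_consecutive examples keep_every → Spec_deduplicate_consecutive examples keep_every (deduplicate_consecutive examples keep_every)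

-- ===== LEMMAS AND PROOFS =====

-- common recursive reference: prev assistant content, current streak
def pvAdup (k : Int) : Option String → Int → List PvEx → List PvEx
  | _, _, [] => []
  | prev, s, ex :: rest =>
    if some (pvContent ex) = prev then
      (if PySem.Int.mod (s + 1) k = 0 then [ex] else []) ++ pvAdup k (some (pvContent ex)) (s + 1) rest
    else
      ex :: pvAdup k (some (pvContent ex)) 0 rest

-- A's enumerate fold computes pvAdup
lemma pvA_fold (examples : List PvEx) (k : Int) (tail : List PvEx) :
    ∀ (n : Nat), examples.drop n = tail →
    ∀ (res : List PvEx) (s : Int),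
      ((PySem.List.enumerate tail (n : Int)).foldl (dedupStepA examples k) (res, s)).1
        = res ++ pvAdup k (if n = 0 then none else some (pvContent (examples.getD (n - 1) []))) s tail := by
  induction tail with
  | nil => intro n _ res s; simp [PySem.List.enumerate_nil, pvAdup]
  | cons x rest ih =>
    intro n hdrop res s
    have hn : n < examples.length := by
      have := congrArg List.length hdrop
      simp [List.length_drop] at this
      omega
    have hx : examples[n] = x := by
      have h0 : (examples.drop n)[0]'(by rw [hdrop]; simp) = x := by
        simp [hdrop]
      simpa using h0
    have hrest : examples.drop (n + 1) = rest := by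
      have h1 : examples.drop (n + 1) = (examples.drop n).drop 1 := by
        rw [List.drop_drop]
      rw [h1, hdrop]
      simp
    have hcast : (n : Int) + 1 = ((n + 1 : Nat) : Int) := by push_cast; ring
    rw [PySem.List.enumerate_cons]
    simp only [List.foldl_cons]
    cases n with
    | zero =>
      have hstep : dedupStepA examples k (res, s) (((0 : Nat) : Int), x) = (res ++ [x], 0) := by
        simp [dedupStepA]
      rw [hstep, hcast, ih 1 hrest (res ++ [x]) 0]
      simp [pvAdup, List.getElem?_eq_getElem hn, hx]
    | succ m =>
      have hm : m < examples.length := by omega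
      have hprev : pvContent ((PySem.List.pyGet? examples (((m + 1 : Nat) : Int) - 1)).getD [])
          = pvContent examples[m] := by
        have he : ((m + 1 : Nat) : Int) - 1 = ((m : Nat) : Int) := by push_cast; ring
        rw [he, PySem.List.pyGet?_natCast]
        simp [List.getElem?_eq_getElem hm]
      have hgetD : examples.getD (m + 1 - 1) [] = examples[m] := by
        simpa using List.getD_eq_getElem examples [] hm
      have hgetD1 : examples.getD (m + 1) [] = x := by
        simpa [hx] using List.getD_eq_getElem examples [] hn
      by_cases hc : pvContent x = pvContent examples[m]
      · have hstep : ∀ r0 : List PvEx, dedupStepA examples k (r0, s) (((m + 1 : Nat) : Int), x)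
            = (if PySem.Int.mod (s + 1) k = 0 then (r0 ++ [x], s + 1) else (r0, s + 1)) := by
          intro r0
          simp only [dedupStepA, hprev]
          rw [if_pos ⟨by positivity, hc⟩]
        rw [hstep, hcast, if_neg (Nat.succ_ne_zero m)]
        have hadup : pvAdup k (some (pvContent (examples.getD (m + 1 - 1) []))) s (x :: rest)
            = (if PySem.Int.mod (s + 1) k = 0 then [x] else [])
                ++ pvAdup k (some (pvContent x)) (s + 1) rest := by
          rw [hgetD]
          simp [pvAdup, hc]
        rw [hadup]
        by_cases hmod : PySem.Int.mod (s + 1) k = 0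
        · rw [if_pos hmod, if_pos hmod, ih (m + 2) hrest (res ++ [x]) (s + 1)]
          simp [List.getElem?_eq_getElem hn, hx]
        · rw [if_neg hmod, if_neg hmod, ih (m + 2) hrest res (s + 1)]
          simp [List.getElem?_eq_getElem hn, hx]
      · have hstep : dedupStepA examples k (res, s) (((m + 1 : Nat) : Int), x) = (res ++ [x], 0) := by
          simp only [dedupStepA, hprev]
          rw [if_neg (by intro hh; exact hc hh.2)]
        rw [hstep, hcast, ih (m + 2) hrest (res ++ [x]) 0, if_neg (Nat.succ_ne_zero m)]
        have hadup : pvAdup k (some (pvContent (examples.getD (m + 1 - 1) []))) s (x :: rest)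
            = x :: pvAdup k (some (pvContent x)) 0 rest := by
          rw [hgetD]
          simp [pvAdup, hc]
        rw [hadup]
        simp [List.getElem?_eq_getElem hn, hx]

lemma pvA_eq_adup (examples : List PvEx) (k : Int) :
    deduplicate_consecutive examples k = pvAdup k none 0 examples := by
  unfold deduplicate_consecutive
  by_cases h : examples = []
  · simp [h, pvAdup]
  · rw [if_neg h]
    have h0 := pvA_fold examples k examples 0 (by simp) [] 0
    simpa using h0

-- B side: abstract grouping
def pvMergeG (current : List PvEx) (key : String) : List PvEx → List (List PvEx)
  | [] => [current]
  | ex :: rest =>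
    if pvContent ex = key then pvMergeG (current ++ [ex]) key rest
    else current :: pvMergeG [ex] (pvContent ex) rest

lemma pvB_fold (rest : List PvEx) :
    ∀ (runs : List (List PvEx)) (current : List PvEx) (key : String),
      (rest.foldl pvGroupStep (runs, current, key)).1 ++ [(rest.foldl pvGroupStep (runs, current, key)).2.1]
        = runs ++ pvMergeG current key rest := by
  induction rest with
  | nil => intro runs current key; simp [pvMergeG]
  | cons y ys ih =>
    intro runs current key
    simp only [List.foldl_cons, pvGroupStep, pvMergeG]
    by_cases h : pvContent y = key
    · simp [h, ih]
    · simp [h, ih]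

def pvGroupsOf : List PvEx → List (List PvEx)
  | [] => []
  | x :: xs =>
    (x :: xs.takeWhile (fun e => pvContent e == pvContent x)) ::
      pvGroupsOf (xs.dropWhile (fun e => pvContent e == pvContent x))
termination_by l => l.length
decreasing_by simp only [List.length_cons]; exact Nat.lt_succ_of_le (List.length_dropWhile_le _ _)

lemma pvGroupsOf_nil : pvGroupsOf [] = [] := by rw [pvGroupsOf.eq_def]

lemma pvGroupsOf_cons (x : PvEx) (xs : List PvEx) :
    pvGroupsOf (x :: xs)
      = (x :: xs.takeWhile (fun e => pvContent e == pvContent x)) ::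
          pvGroupsOf (xs.dropWhile (fun e => pvContent e == pvContent x)) := by
  rw [pvGroupsOf.eq_def]

lemma pvMergeG_eq (rest : List PvEx) :
    ∀ (current : List PvEx) (key : String),
      pvMergeG current key rest
        = (current ++ rest.takeWhile (fun e => pvContent e == key)) ::
            pvGroupsOf (rest.dropWhile (fun e => pvContent e == key)) := by
  induction rest with
  | nil => intro current key; simp [pvMergeG, pvGroupsOf_nil]
  | cons y ys ih =>
    intro current key
    by_cases h : pvContent y = key
    · simp [pvMergeG, h, ih]
    · have hb : (pvContent y == key) = false := beq_eq_false_iff_ne.mpr h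
      simp [pvMergeG, h, hb, ih, pvGroupsOf_cons]

def pvKeptF (k : Int) (j : Int) : List PvEx → List PvEx
  | [] => []
  | y :: ys => (if PySem.Int.mod (j + 1) k = 0 then [y] else []) ++ pvKeptF k (j + 1) ys

lemma pvKeep_zipIdx (k : Int) (t : List PvEx) (m : Nat) :
      (t.zipIdx (m + 1)).filterMap
        (fun p => if p.2 = 0 ∨ PySem.Int.mod (p.2 : Int) k = 0 then some p.1 else none)
        = pvKeptF k (m : Int) t := by
  induction t generalizing m with
  | nil => simp [pvKeptF]
  | cons y ys ih =>
    have hcast : ((m + 1 : Nat) : Int) = (m : Int) + 1 := by push_cast; ring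
    simp only [List.zipIdx_cons, List.filterMap_cons, pvKeptF]
    by_cases h : PySem.Int.mod ((m : Int) + 1) k = 0
    · simp [hcast, h, ih]
    · simp [hcast, h, ih]

lemma pvKeep_cons (k : Int) (x : PvEx) (t : List PvEx) :
    pvKeep k (x :: t) = x :: pvKeptF k 0 t := by
  unfold pvKeep
  simp only [List.zipIdx_cons, List.filterMap_cons]
  rw [show (0 + 1 : Nat) = 0 + 1 from rfl]
  rw [pvKeep_zipIdx k t 0]
  simp

lemma pvAdup_run (k : Int) (xs : List PvEx) :
    ∀ (key : String) (j : Int),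
      pvAdup k (some key) j xs
        = pvKeptF k j (xs.takeWhile (fun e => pvContent e == key))
            ++ pvAdup k none 0 (xs.dropWhile (fun e => pvContent e == key)) := by
  induction xs with
  | nil => intro key j; simp [pvAdup, pvKeptF]
  | cons y ys ih =>
    intro key j
    by_cases h : pvContent y = key
    · have hb : (pvContent y == key) = true := beq_iff_eq.mpr h
      simp [pvAdup, h, ih, pvKeptF]
    · have hb : (pvContent y == key) = false := beq_eq_false_iff_ne.mpr h
      have hs : ¬ (some (pvContent y) = some key) := by simpa using h
      simp [pvAdup, hs, hb, pvKeptF]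

lemma pvAdup_groups (k : Int) (l : List PvEx) :
    pvAdup k none 0 l = (pvGroupsOf l).flatMap (pvKeep k) := by
  induction l using pvGroupsOf.induct with
  | case1 => simp [pvAdup, pvGroupsOf_nil]
  | case2 x xs ih =>
    rw [pvGroupsOf_cons, List.flatMap_cons, pvKeep_cons]
    have h0 : pvAdup k none 0 (x :: xs) = x :: pvAdup k (some (pvContent x)) 0 xs := by
      simp [pvAdup]
    rw [h0, pvAdup_run k xs (pvContent x) 0, ih]
    simp

-- ===== VERDICT (by name: the statement is the Claim_ definition above) =====
theorem deduplicate_consecutive_spec : Claim_equal_deduplicate_consecutive := by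
  intro examples keep_every _hdom _hpre
  unfold Spec_deduplicate_consecutive
  rw [pvA_eq_adup, pvAdup_groups]
  cases examples with
  | nil => simp [deduplicate_consecutive_alt, pvGroupsOf.eq_def]
  | cons x rest =>
    show _ = deduplicate_consecutive_alt (x :: rest) keep_every
    unfold deduplicate_consecutive_alt
    simp only
    rw [pvB_fold rest [] [x] (pvContent x), pvMergeG_eq]
    rw [show pvGroupsOf (x :: rest) = (x :: rest.takeWhile (fun e => pvContent e == pvContent x)) :: pvGroupsOf (rest.dropWhile (fun e => pvContent e == pvContent x)) from by rw [pvGroupsOf.eq_def]]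
    simp
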